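-- pv_equiv track=rewrite | github.com/jjc98375/Machine-Learning | finalproject-stepbystep/phase1/labeling.py | create_shifted_labels
-- ===== SOURCE A (Python) =====
-- from typing import Dict, List, Tuple
--
-- def create_shifted_labels(
--     token_langs: List[str],
-- ) -> Tuple[List[int], List[int]]:
--     """
--     Create prediction labels from language tags.
--
--     y_sw[t]:  Will token t+1 be a different language?
--               0 = no switch, 1 = switch, -100 = can't predict (last token)
--
--     y_dur[t]: If there's a switch at t+1, how long will it last?
--               0 = Small (1-2 words), 1 = Medium (3-6), 2 = Large (7+)
--               -100 = no switch here (question doesn't apply)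
--     """
--     n = len(token_langs)
--
--     # Pre-compute segment lengths (how many consecutive words share a language)
--     seg_lens = {}
--     i = 0
--     while i < n:
--         start, lang = i, token_langs[i]
--         while i < n and token_langs[i] == lang:
--             i += 1
--         seg_lens[start] = i - start
--
--     y_sw, y_dur = [], []
--     for t in range(n):
--         if t == n - 1:
--             # Last token: no next word to predict
--             y_sw.append(-100)
--             y_dur.append(-100)
--         elif token_langs[t] != token_langs[t + 1]:
--             # Switch! Language changes at t+1
--             y_sw.append(1)
--             seg = seg_lens.get(t + 1, 1)
--             y_dur.append(0 if seg <= 2 else 1 if seg <= 6 else 2)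
--         else:
--             # No switch. Same language continues.
--             y_sw.append(0)
--             y_dur.append(-100)  # duration only defined at switch points
--
--     return y_sw, y_dur
-- ===== SOURCE B (Python) =====
-- from typing import List, Tuple
--
--
-- def create_shifted_labels(
--     token_langs: List[str],
-- ) -> Tuple[List[int], List[int]]:
--     n = len(token_langs)
--
--     # One linear scan building the run segments as (start, length) pairs.
--     segments = []
--     i = 0
--     while i < n:
--         j = i
--         while j < n and token_langs[j] == token_langs[i]:
--             j += 1
--         segments.append((i, j - i))
--         i = j
--
--     y_sw = [0] * n
--     y_dur = [-100] * n
--     if n > 0: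
--         y_sw[n - 1] = -100
--
--     # Every segment after the first begins right after a switch at start-1.
--     for start, length in segments[1:]:
--         y_sw[start - 1] = 1
--         y_dur[start - 1] = 0 if length <= 2 else (1 if length <= 6 else 2)
--
--     return y_sw, y_dur
-- ===== Notes on version B (the rewrite author's own statement) =====
-- stated objective: alternative
-- what changed: B builds an explicit (start,length) segment list in one linear scan and scatter-writes only the switch positions into pre-initialized arrays, instead of A's start->length dict plus a per-token loop that re-tests neighbour equality and appends; same O(n) cost, different decomposition.
import Mathlib
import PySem

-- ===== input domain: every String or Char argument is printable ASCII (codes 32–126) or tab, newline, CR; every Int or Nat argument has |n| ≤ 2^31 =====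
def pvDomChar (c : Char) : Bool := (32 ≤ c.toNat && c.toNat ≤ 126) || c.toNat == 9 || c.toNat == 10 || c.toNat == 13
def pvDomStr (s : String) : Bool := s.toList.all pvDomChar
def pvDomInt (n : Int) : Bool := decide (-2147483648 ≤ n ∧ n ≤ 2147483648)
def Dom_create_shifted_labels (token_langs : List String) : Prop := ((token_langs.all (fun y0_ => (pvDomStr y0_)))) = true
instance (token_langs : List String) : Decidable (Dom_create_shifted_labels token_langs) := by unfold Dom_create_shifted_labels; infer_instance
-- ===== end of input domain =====

-- B replaces A's segment-length dict + per-token append loop by a segment list built in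
-- one scan and scatter writes into pre-initialized label arrays (objective: alternative decomposition).

-- ===== PORT A =====
-- inner while of A: 'while i < n and token_langs[i] == lang: i += 1', returns final i
def runScanA (xs : List String) (lang : String) (i : Nat) : Nat :=
  if _h : i < xs.length then
    (if xs.getD i "" = lang then runScanA xs lang (i + 1) else i)
  else i
termination_by xs.length - i
decreasing_by omega

theorem runScanA_ge (xs : List String) (lang : String) (i : Nat) : i ≤ runScanA xs lang i := by
  rw [runScanA]
  split
  · split
    · have := runScanA_ge xs lang (i + 1); omega
    · omega
  · omega
termination_by xs.length - i
decreasing_by omega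

theorem runScanA_lt_start (xs : List String) (i : Nat) (h : i < xs.length) :
    i < runScanA xs (xs.getD i "") i := by
  rw [runScanA]
  rw [dif_pos h, if_pos rfl]
  have := runScanA_ge xs (xs.getD i "") (i + 1); omega

-- outer while of A, building the dict start ↦ length
def segLoopA (xs : List String) (i : Nat) (d : PySem.Dict Int Int) : PySem.Dict Int Int :=
  if h : i < xs.length then
    segLoopA xs (runScanA xs (xs.getD i "") i)
      (d.insert (i : Int) ((runScanA xs (xs.getD i "") i : Int) - (i : Int)))
  else d
termination_by xs.length - i
decreasing_by have := runScanA_lt_start xs i h; omega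

-- the 'for t in range(n)' loop of A, appending to y_sw / y_dur
def buildA (xs : List String) (d : PySem.Dict Int Int) : List Int × List Int :=
  (List.range xs.length).foldl
    (fun acc t =>
      if t = xs.length - 1 then (acc.1 ++ [-100], acc.2 ++ [-100])
      else if xs.getD t "" ≠ xs.getD (t + 1) "" then
        (acc.1 ++ [1], acc.2 ++
          [if d.getD ((t : Int) + 1) 1 ≤ 2 then (0 : Int)
           else if d.getD ((t : Int) + 1) 1 ≤ 6 then 1 else 2])
      else (acc.1 ++ [0], acc.2 ++ [-100]))
    ([], [])

def create_shifted_labels (token_langs : List String) : List Int × List Int :=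
  buildA token_langs (segLoopA token_langs 0 PySem.Dict.empty)

-- ===== PORT B =====
-- inner while of B: 'while j < n and token_langs[j] == token_langs[i]: j += 1'
def runScanB (xs : List String) (i : Nat) (j : Nat) : Nat :=
  if _h : j < xs.length then
    (if xs.getD j "" = xs.getD i "" then runScanB xs i (j + 1) else j)
  else j
termination_by xs.length - j
decreasing_by omega

theorem runScanB_ge (xs : List String) (i j : Nat) : j ≤ runScanB xs i j := by
  rw [runScanB]
  split
  · split
    · have := runScanB_ge xs i (j + 1); omega
    · omega
  · omega
termination_by xs.length - j
decreasing_by omega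

theorem runScanB_lt_start (xs : List String) (i : Nat) (h : i < xs.length) :
    i < runScanB xs i i := by
  rw [runScanB]
  rw [dif_pos h, if_pos rfl]
  have := runScanB_ge xs i (i + 1); omega

-- outer while of B, building the (start, length) segment list
def segScanB (xs : List String) (i : Nat) : List (Nat × Nat) :=
  if h : i < xs.length then
    (i, runScanB xs i i - i) :: segScanB xs (runScanB xs i i)
  else []
termination_by xs.length - i
decreasing_by have := runScanB_lt_start xs i h; omega

-- the duration bucket '0 if length <= 2 else (1 if length <= 6 else 2)'
def bucketB (len : Nat) : Int := if len ≤ 2 then 0 else if len ≤ 6 then 1 else 2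

-- body of B's 'for start, length in segments[1:]' loop (two in-place writes)
def applyB (acc : List Int × List Int) (seg : Nat × Nat) : List Int × List Int :=
  (acc.1.set (seg.1 - 1) 1, acc.2.set (seg.1 - 1) (bucketB seg.2))

def create_shifted_labels_alt (token_langs : List String) : List Int × List Int :=
  ((segScanB token_langs 0).drop 1).foldl applyB
    (if 0 < token_langs.length then
       ((List.replicate token_langs.length 0).set (token_langs.length - 1) (-100),
        List.replicate token_langs.length (-100))
     else (List.replicate token_langs.length 0, List.replicate token_langs.length (-100)))

-- ===== PRECONDITION & SPEC =====
def Spec_create_shifted_labels (token_langs : List String) (out : List Int × List Int) : Prop := out = create_shifted_labels_alt token_langs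
instance (token_langs : List String) (out : List Int × List Int) : Decidable (Spec_create_shifted_labels token_langs out) := by unfold Spec_create_shifted_labels; infer_instance

-- ===== CLAIM (what is proved, stated in full; the proofs are below) =====
def Claim_equal_create_shifted_labels : Prop := ∀ (token_langs : List String), Dom_create_shifted_labels token_langs → Spec_create_shifted_labels token_langs (create_shifted_labels token_langs)

-- ===== LEMMAS AND PROOFS =====

-- B's inner while with a fixed anchor i scans the same run as A's with lang = xs[i]
theorem runScanB_eq (xs : List String) (i j : Nat) :
    runScanB xs i j = runScanA xs (xs.getD i "") j := by
  rw [runScanB, runScanA]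
  split
  · split
    · exact runScanB_eq xs i (j + 1)
    · rfl
  · rfl
termination_by xs.length - j
decreasing_by omega


-- run-scan facts -------------------------------------------------------------

theorem runScanA_mem (xs : List String) (lang : String) (i k : Nat)
    (h1 : i ≤ k) (h2 : k < runScanA xs lang i) : xs.getD k "" = lang := by
  rw [runScanA] at h2
  by_cases hi : i < xs.length
  · rw [dif_pos hi] at h2
    by_cases he : xs.getD i "" = lang
    · rw [if_pos he] at h2
      rcases Nat.eq_or_lt_of_le h1 with rfl | hlt
      · exact he
      · exact runScanA_mem xs lang (i + 1) k hlt h2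
    · rw [if_neg he] at h2; omega
  · rw [dif_neg hi] at h2; omega
termination_by xs.length - i
decreasing_by omega

theorem runScanA_stop (xs : List String) (lang : String) (i : Nat)
    (h : runScanA xs lang i < xs.length) : xs.getD (runScanA xs lang i) "" ≠ lang := by
  rw [runScanA] at h ⊢
  by_cases hi : i < xs.length
  · rw [dif_pos hi] at h ⊢
    by_cases he : xs.getD i "" = lang
    · rw [if_pos he] at h ⊢
      exact runScanA_stop xs lang (i + 1) h
    · rw [if_neg he] at h ⊢
      exact he
  · rw [dif_neg hi] at h
    exact absurd h hi
termination_by xs.length - i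
decreasing_by omega

-- length of the run starting at k
def rlen (xs : List String) (k : Nat) : Nat := runScanA xs (xs.getD k "") k - k

-- dict characterization for A's segment loop ---------------------------------

theorem segLoopA_getD_lt (xs : List String) (i : Nat) (d : PySem.Dict Int Int) (k : Nat)
    (hk : k < i) : (segLoopA xs i d).getD (k : Int) 1 = d.getD (k : Int) 1 := by
  rw [segLoopA]
  split
  · rename_i h
    rw [segLoopA_getD_lt xs _ _ k (by have := runScanA_lt_start xs i h; omega)]
    rw [PySem.Dict.getD_insert]
    rw [if_neg (by exact_mod_cast Nat.ne_of_lt hk)]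
  · rfl
termination_by xs.length - i
decreasing_by have := runScanA_lt_start xs i ‹_›; omega

theorem segLoopA_getD (xs : List String) (i : Nat) (d : PySem.Dict Int Int) (k : Nat)
    (h1 : i ≤ k) (h2 : k < xs.length)
    (h3 : k = i ∨ xs.getD (k - 1) "" ≠ xs.getD k "") :
    (segLoopA xs i d).getD (k : Int) 1 = ((rlen xs k : Nat) : Int) := by
  have hi : i < xs.length := by omega
  rw [segLoopA, dif_pos hi]
  by_cases hki : k = i
  · subst hki
    have hj := runScanA_lt_start xs k hi
    rw [segLoopA_getD_lt xs _ _ k hj]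
    rw [PySem.Dict.getD_insert, if_pos rfl]
    have hge := runScanA_ge xs (xs.getD k "") k
    unfold rlen
    omega
  · have hne := h3.resolve_left hki
    have hjk : runScanA xs (xs.getD i "") i ≤ k := by
      by_contra hlt
      push_neg at hlt
      have e1 := runScanA_mem xs (xs.getD i "") i (k - 1) (by omega) (by omega)
      have e2 := runScanA_mem xs (xs.getD i "") i k h1 hlt
      exact hne (by rw [e1, e2])
    exact segLoopA_getD xs _ _ k hjk h2 (Or.inr hne)
termination_by xs.length - i
decreasing_by have := runScanA_lt_start xs i hi; omega

-- element-wise description of the common output ------------------------------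

def fswF (xs : List String) (t : Nat) : Int :=
  if t = xs.length - 1 then -100
  else if xs.getD t "" ≠ xs.getD (t + 1) "" then 1 else 0

def fdurF (xs : List String) (t : Nat) : Int :=
  if t = xs.length - 1 then -100
  else if xs.getD t "" ≠ xs.getD (t + 1) "" then bucketB (rlen xs (t + 1)) else -100

-- A's append loop is a pair of maps ------------------------------------------

theorem foldl_app2 {α : Type} (f g : α → Int)
    (step : List Int × List Int → α → List Int × List Int)
    (hstep : ∀ acc x, step acc x = (acc.1 ++ [f x], acc.2 ++ [g x])) :
    ∀ (l : List α) (a b : List Int),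
      l.foldl step (a, b) = (a ++ l.map f, b ++ l.map g) := by
  intro l
  induction l with
  | nil => intro a b; simp
  | cons x l ih =>
    intro a b
    rw [List.foldl_cons, hstep]
    rw [ih (a ++ [f x]) (b ++ [g x])]
    simp

theorem buildA_eq (xs : List String) (d : PySem.Dict Int Int) :
    buildA xs d =
      ((List.range xs.length).map (fun t =>
          if t = xs.length - 1 then (-100 : Int)
          else if xs.getD t "" ≠ xs.getD (t + 1) "" then 1 else 0),
       (List.range xs.length).map (fun t =>
          if t = xs.length - 1 then (-100 : Int)
          else if xs.getD t "" ≠ xs.getD (t + 1) "" then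
            (if d.getD ((t : Int) + 1) 1 ≤ 2 then (0 : Int)
             else if d.getD ((t : Int) + 1) 1 ≤ 6 then 1 else 2)
          else -100)) := by
  unfold buildA
  rw [foldl_app2
      (fun t => if t = xs.length - 1 then (-100 : Int)
        else if xs.getD t "" ≠ xs.getD (t + 1) "" then 1 else 0)
      (fun t => if t = xs.length - 1 then (-100 : Int)
        else if xs.getD t "" ≠ xs.getD (t + 1) "" then
          (if d.getD ((t : Int) + 1) 1 ≤ 2 then (0 : Int)
           else if d.getD ((t : Int) + 1) 1 ≤ 6 then 1 else 2)
        else -100)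
      _ (fun acc t => by dsimp only; split_ifs <;> rfl)]
  simp

theorem A_char (xs : List String) :
    create_shifted_labels xs =
      ((List.range xs.length).map (fswF xs), (List.range xs.length).map (fdurF xs)) := by
  unfold create_shifted_labels
  rw [buildA_eq]
  refine Prod.ext ?_ ?_
  · rfl
  · apply List.map_congr_left
    intro t ht
    have htn : t < xs.length := List.mem_range.mp ht
    unfold fdurF
    by_cases h1 : t = xs.length - 1
    · simp [h1]
    · rw [if_neg h1, if_neg h1]
      by_cases h2 : xs.getD t "" ≠ xs.getD (t + 1) ""
      · rw [if_pos h2, if_pos h2]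
        have hcast : ((t : Int) + 1) = ((t + 1 : Nat) : Int) := by push_cast; ring
        rw [hcast, segLoopA_getD xs 0 PySem.Dict.empty (t + 1) (by omega) (by omega)
          (Or.inr (by simpa using h2))]
        unfold bucketB
        split_ifs <;> first | rfl | omega
      · rw [if_neg h2, if_neg h2]

-- facts about B's segment list ------------------------------------------------

theorem segScanB_props (xs : List String) (i : Nat) :
    ∀ p ∈ segScanB xs i,
      (i ≤ p.1 ∧ p.1 < xs.length) ∧ p.2 = rlen xs p.1 ∧
        (p.1 = i ∨ xs.getD (p.1 - 1) "" ≠ xs.getD p.1 "") := by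
  intro p hp
  rw [segScanB] at hp
  split at hp
  · rename_i h
    rcases List.mem_cons.mp hp with heq | htail
    · subst heq
      refine ⟨⟨Nat.le_refl i, h⟩, ?_, Or.inl rfl⟩
      simp [rlen, runScanB_eq]
    · have hij := runScanB_lt_start xs i h
      obtain ⟨⟨h1a, h1b⟩, h1c, h1d⟩ := segScanB_props xs (runScanB xs i i) p htail
      refine ⟨⟨by omega, h1b⟩, h1c, ?_⟩
      right
      rcases h1d with hpj | hne
      · have hje : runScanB xs i i = runScanA xs (xs.getD i "") i := runScanB_eq xs i i
        have e1 : xs.getD (p.1 - 1) "" = xs.getD i "" := by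
          apply runScanA_mem xs (xs.getD i "") i (p.1 - 1) (by omega)
          rw [← hje]; omega
        have e2 : xs.getD p.1 "" ≠ xs.getD i "" := by
          rw [hpj, hje]
          exact runScanA_stop xs (xs.getD i "") i (by rw [← hje, ← hpj]; exact h1b)
        rw [e1]
        exact fun hcontra => e2 hcontra.symm
      · exact hne
  · cases hp
termination_by xs.length - i
decreasing_by have := runScanB_lt_start xs i ‹_›; omega

theorem segScanB_complete (xs : List String) (i k : Nat)
    (h1 : i ≤ k) (h2 : k < xs.length)
    (h3 : k = i ∨ xs.getD (k - 1) "" ≠ xs.getD k "") :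
    (k, rlen xs k) ∈ segScanB xs i := by
  have hi : i < xs.length := by omega
  rw [segScanB, dif_pos hi]
  by_cases hki : k = i
  · subst hki
    have : runScanB xs k k - k = rlen xs k := by rw [runScanB_eq]; rfl
    rw [this]
    exact List.mem_cons_self ..
  · have hne := h3.resolve_left hki
    have hij := runScanB_lt_start xs i hi
    have hje : runScanB xs i i = runScanA xs (xs.getD i "") i := runScanB_eq xs i i
    have hjk : runScanB xs i i ≤ k := by
      by_contra hlt
      push_neg at hlt
      rw [hje] at hlt
      have e1 := runScanA_mem xs (xs.getD i "") i (k - 1) (by omega) (by omega)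
      have e2 := runScanA_mem xs (xs.getD i "") i k h1 hlt
      exact hne (by rw [e1, e2])
    exact List.mem_cons_of_mem _ (segScanB_complete xs (runScanB xs i i) k hjk h2 (Or.inr hne))
termination_by xs.length - i
decreasing_by have := runScanB_lt_start xs i hi; omega

theorem segScanB_sorted (xs : List String) (i : Nat) :
    (segScanB xs i).Pairwise (fun p q => p.1 < q.1) := by
  rw [segScanB]
  split
  · rename_i h
    rw [List.pairwise_cons]
    constructor
    · intro p hp
      have h1 := (segScanB_props xs (runScanB xs i i) p hp).1.1
      have h2 := runScanB_lt_start xs i h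
      simp only
      omega
    · exact segScanB_sorted xs (runScanB xs i i)
  · exact List.Pairwise.nil
termination_by xs.length - i
decreasing_by have := runScanB_lt_start xs i ‹_›; omega

-- behaviour of B's scatter loop -----------------------------------------------

theorem foldl_applyB_length (l : List (Nat × Nat)) :
    ∀ acc : List Int × List Int,
      (l.foldl applyB acc).1.length = acc.1.length ∧
        (l.foldl applyB acc).2.length = acc.2.length := by
  induction l with
  | nil => intro acc; exact ⟨rfl, rfl⟩
  | cons p l ih =>
    intro acc
    have := ih (applyB acc p)
    simpa [applyB, List.length_set] using this

theorem foldl_applyB_nomatch (l : List (Nat × Nat)) (t : Nat)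
    (h : ∀ p ∈ l, p.1 - 1 ≠ t) :
    ∀ acc : List Int × List Int,
      (l.foldl applyB acc).1[t]? = acc.1[t]? ∧
        (l.foldl applyB acc).2[t]? = acc.2[t]? := by
  induction l with
  | nil => intro acc; exact ⟨rfl, rfl⟩
  | cons p l ih =>
    intro acc
    have hp := h p (List.mem_cons_self ..)
    have h' : ∀ q ∈ l, q.1 - 1 ≠ t := fun q hq => h q (List.mem_cons_of_mem _ hq)
    have ihr := (ih h') (applyB acc p)
    constructor
    · rw [List.foldl_cons, ihr.1]
      show (acc.1.set (p.1 - 1) 1)[t]? = acc.1[t]?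
      exact List.getElem?_set_ne hp
    · rw [List.foldl_cons, ihr.2]
      show (acc.2.set (p.1 - 1) (bucketB p.2))[t]? = acc.2[t]?
      exact List.getElem?_set_ne hp

theorem foldl_applyB_match (s len : Nat) :
    ∀ (l : List (Nat × Nat)) (acc : List Int × List Int),
      (s, len) ∈ l → l.Pairwise (fun p q => p.1 < q.1) → (∀ p ∈ l, 1 ≤ p.1) →
      s - 1 < acc.1.length → s - 1 < acc.2.length →
      (l.foldl applyB acc).1[s - 1]? = some 1 ∧
        (l.foldl applyB acc).2[s - 1]? = some (bucketB len) := by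
  intro l
  induction l with
  | nil => intro acc hm; cases hm
  | cons p l ih =>
    intro acc hm hsorted hpos hb1 hb2
    rw [List.pairwise_cons] at hsorted
    rcases List.mem_cons.mp hm with heq | htail
    · subst heq
      have hs1 := hpos (s, len) (List.mem_cons_self ..)
      have hnom : ∀ q ∈ l, q.1 - 1 ≠ s - 1 := by
        intro q hq
        have h1 := hsorted.1 q hq
        simp only at h1 hs1
        omega
      rw [List.foldl_cons]
      have hn := foldl_applyB_nomatch l (s - 1) hnom (applyB acc (s, len))
      constructor
      · rw [hn.1]
        show (acc.1.set (s - 1) 1)[s - 1]? = some 1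
        exact List.getElem?_set_self hb1
      · rw [hn.2]
        show (acc.2.set (s - 1) (bucketB len))[s - 1]? = some (bucketB len)
        exact List.getElem?_set_self hb2
    · rw [List.foldl_cons]
      exact ih (applyB acc p) htail hsorted.2
        (fun q hq => hpos q (List.mem_cons_of_mem _ hq))
        (by simpa [applyB] using hb1) (by simpa [applyB] using hb2)

theorem B_char (xs : List String) :
    create_shifted_labels_alt xs =
      ((List.range xs.length).map (fswF xs), (List.range xs.length).map (fdurF xs)) := by
  rcases Nat.eq_zero_or_pos xs.length with hn | hn
  · have hx : xs = [] := List.eq_nil_of_length_eq_zero hn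
    subst hx
    have hs : segScanB ([] : List String) 0 = [] := by rw [segScanB]; rfl
    simp [create_shifted_labels_alt, hs]
  · unfold create_shifted_labels_alt
    rw [if_pos hn]
    have hseg : segScanB xs 0 = (0, runScanB xs 0 0 - 0) :: segScanB xs (runScanB xs 0 0) := by
      rw [segScanB, dif_pos hn]
    rw [hseg]
    rw [List.drop_succ_cons, List.drop_zero]
    have hj0 : 0 < runScanB xs 0 0 := runScanB_lt_start xs 0 hn
    have htail_props : ∀ p ∈ segScanB xs (runScanB xs 0 0),
        1 ≤ p.1 ∧ p.1 < xs.length ∧ p.2 = rlen xs p.1 ∧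
          xs.getD (p.1 - 1) "" ≠ xs.getD p.1 "" := by
      intro p hp
      obtain ⟨⟨ha, hb⟩, hc, hd⟩ := segScanB_props xs (runScanB xs 0 0) p hp
      have hp0 : p ∈ segScanB xs 0 := by rw [hseg]; exact List.mem_cons_of_mem _ hp
      obtain ⟨_, _, hd0⟩ := segScanB_props xs 0 p hp0
      refine ⟨by omega, hb, hc, ?_⟩
      rcases hd0 with hz | hne
      · omega
      · exact hne
    have hsorted : (segScanB xs (runScanB xs 0 0)).Pairwise (fun p q => p.1 < q.1) := by
      have := segScanB_sorted xs 0
      rw [hseg, List.pairwise_cons] at this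
      exact this.2
    set init : List Int × List Int :=
      ((List.replicate xs.length 0).set (xs.length - 1) (-100),
        List.replicate xs.length (-100)) with hinit
    have hlen1 : init.1.length = xs.length := by simp [hinit]
    have hlen2 : init.2.length = xs.length := by simp [hinit]
    have main : ∀ t : Nat,
        ((segScanB xs (runScanB xs 0 0)).foldl applyB init).1[t]? =
          ((List.range xs.length).map (fswF xs))[t]? ∧
        ((segScanB xs (runScanB xs 0 0)).foldl applyB init).2[t]? =
          ((List.range xs.length).map (fdurF xs))[t]? := by
      intro t
      have hflen := foldl_applyB_length (segScanB xs (runScanB xs 0 0)) init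
      by_cases ht : t < xs.length
      · have hrhs1 : ((List.range xs.length).map (fswF xs))[t]? = some (fswF xs t) := by
          simp [List.getElem?_map, List.getElem?_range ht]
        have hrhs2 : ((List.range xs.length).map (fdurF xs))[t]? = some (fdurF xs t) := by
          simp [List.getElem?_map, List.getElem?_range ht]
        rw [hrhs1, hrhs2]
        by_cases h1 : t = xs.length - 1
        · have hnom : ∀ p ∈ segScanB xs (runScanB xs 0 0), p.1 - 1 ≠ t := by
            intro p hp
            obtain ⟨ha, hb, _, _⟩ := htail_props p hp
            omega
          have hn0 := foldl_applyB_nomatch _ t hnom init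
          rw [hn0.1, hn0.2]
          constructor
          · show ((List.replicate xs.length 0).set (xs.length - 1) (-100))[t]? = _
            rw [h1, List.getElem?_set_self (by simp; omega)]
            simp [fswF]
          · show (List.replicate xs.length (-100 : Int))[t]? = _
            rw [List.getElem?_replicate, if_pos ht]
            simp only [fdurF]
            rw [if_pos h1]
        · by_cases h2 : xs.getD t "" = xs.getD (t + 1) ""
          · have hnom : ∀ p ∈ segScanB xs (runScanB xs 0 0), p.1 - 1 ≠ t := by
              intro p hp
              obtain ⟨ha, hb, hc, hd⟩ := htail_props p hp
              intro hcontra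
              apply hd
              have hp1 : p.1 = t + 1 := by omega
              rw [hp1]
              simpa using h2
            have hn0 := foldl_applyB_nomatch _ t hnom init
            rw [hn0.1, hn0.2]
            constructor
            · show ((List.replicate xs.length 0).set (xs.length - 1) (-100))[t]? = _
              rw [List.getElem?_set_ne (by omega)]
              rw [List.getElem?_replicate, if_pos ht]
              simp only [fswF]
              rw [if_neg h1, if_neg (not_not_intro h2)]
            · show (List.replicate xs.length (-100 : Int))[t]? = _
              rw [List.getElem?_replicate, if_pos ht]
              simp only [fdurF]
              rw [if_neg h1, if_neg (not_not_intro h2)]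
          · have ht1 : t + 1 < xs.length := by omega
            have hmem : (t + 1, rlen xs (t + 1)) ∈ segScanB xs (runScanB xs 0 0) := by
              have h0 : (t + 1, rlen xs (t + 1)) ∈ segScanB xs 0 :=
                segScanB_complete xs 0 (t + 1) (by omega) ht1 (Or.inr (by simpa using h2))
              rw [hseg] at h0
              rcases List.mem_cons.mp h0 with he | h'
              · exfalso
                have := congrArg Prod.fst he
                simp at this
              · exact h'
            have hmain := foldl_applyB_match (t + 1) (rlen xs (t + 1)) _ init hmem hsorted
              (fun p hp => (htail_props p hp).1)
              (by omega) (by omega)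
            simp only [Nat.add_sub_cancel] at hmain
            rw [hmain.1, hmain.2]
            constructor
            · simp only [fswF]
              rw [if_neg h1, if_pos h2]
            · simp only [fdurF]
              rw [if_neg h1, if_pos h2]
      · have hl1 : ((segScanB xs (runScanB xs 0 0)).foldl applyB init).1.length ≤ t := by omega
        have hl2 : ((segScanB xs (runScanB xs 0 0)).foldl applyB init).2.length ≤ t := by omega
        constructor
        · rw [List.getElem?_eq_none hl1, List.getElem?_eq_none (by simpa using Nat.le_of_not_lt ht)]
        · rw [List.getElem?_eq_none hl2, List.getElem?_eq_none (by simpa using Nat.le_of_not_lt ht)]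
    exact Prod.ext (List.ext_getElem? fun t => (main t).1) (List.ext_getElem? fun t => (main t).2)

-- ===== VERDICT (by name: the statement is the Claim_ definition above) =====
theorem create_shifted_labels_spec : Claim_equal_create_shifted_labels := by
  intro xs _hdom
  unfold Spec_create_shifted_labels
  rw [A_char, B_char]
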